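-- pv_equiv track=rewrite | github.com/GlebVST/orbit-server | scripts/calcCdf.py | combine_cdf
-- ===== SOURCE A (Python) =====
-- import collections
--
-- def combine_cdf(cdf1, cdf2):
--     '''
--         Combines two dictionaries of cumulative counts
--         into one newly created dictionary and returns it
--     '''
--     new_cdf = collections.Counter()
--     cdf1_bins = cdf1.keys()
--     cdf2_bins = cdf2.keys()
--
--     new_min_bin = int(min(min(cdf1_bins), min(cdf2_bins)))
--     new_max_bin = int(max(max(cdf1_bins), max(cdf2_bins)))
--
--     new_bins = [i for i in range(new_min_bin, new_max_bin + 1)]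
--
--     cum_count = 0
--     prev_cdf1_count = 0
--     prev_cdf2_count = 0
--     for b in new_bins:
--         if b in cdf1:
--             cum_count += max(cdf1[b] - prev_cdf1_count, 0)
--             prev_cdf1_count = cdf1[b]
--         if b in cdf2:
--             cum_count += max(cdf2[b] - prev_cdf2_count, 0)
--             prev_cdf2_count = cdf2[b]
--         new_cdf[b] = cum_count
--
--     return new_cdf
-- ===== SOURCE B (Python) =====
-- import collections
--
--
-- def _contribs(cdf):
--     """Per-source pass: map each present bin to its clamped running total
--     (sum of positive jumps over the bins in ascending order)."""
--     out = {}
--     total = 0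
--     prev = 0
--     for k in sorted(cdf):
--         cur = cdf[k]
--         total += max(cur - prev, 0)
--         out[k] = total
--         prev = cur
--     return out
--
--
-- def combine_cdf(cdf1, cdf2):
--     '''
--         Combines two dictionaries of cumulative counts
--         into one newly created dictionary and returns it
--     '''
--     c1 = _contribs(cdf1)
--     c2 = _contribs(cdf2)
--
--     lo = int(min(min(cdf1), min(cdf2)))
--     hi = int(max(max(cdf1), max(cdf2)))
--
--     new_cdf = collections.Counter()
--     v1 = 0
--     v2 = 0
--     for b in range(lo, hi + 1):
--         if b in c1:
--             v1 = c1[b]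
--         if b in c2:
--             v2 = c2[b]
--         new_cdf[b] = v1 + v2
--     return new_cdf
-- ===== Notes on version B (the rewrite author's own statement) =====
-- stated objective: alternative
-- what changed: A's single interleaved sweep carrying two prev-values and one running sum is decomposed into two independent per-source passes over each dict's sorted keys that precompute each source's clamped running total at its own bins, followed by one combining sweep that only carries forward the latest precomputed contribution of each source and adds them.
import Mathlib
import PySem

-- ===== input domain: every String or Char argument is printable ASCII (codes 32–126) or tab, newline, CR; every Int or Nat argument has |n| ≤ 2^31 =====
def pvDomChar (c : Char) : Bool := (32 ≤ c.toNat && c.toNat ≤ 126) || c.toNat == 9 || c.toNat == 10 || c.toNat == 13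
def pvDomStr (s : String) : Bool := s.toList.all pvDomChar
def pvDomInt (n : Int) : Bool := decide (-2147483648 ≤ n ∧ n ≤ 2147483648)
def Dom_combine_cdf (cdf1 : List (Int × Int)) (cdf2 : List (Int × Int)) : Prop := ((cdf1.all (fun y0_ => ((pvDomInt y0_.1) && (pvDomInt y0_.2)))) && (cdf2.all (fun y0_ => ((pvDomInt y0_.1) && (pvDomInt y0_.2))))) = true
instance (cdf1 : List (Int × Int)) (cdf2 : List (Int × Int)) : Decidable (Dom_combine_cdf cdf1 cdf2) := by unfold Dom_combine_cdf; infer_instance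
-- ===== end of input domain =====

-- B replaces A's single interleaved sweep by two per-source sorted-key passes precomputing each
-- source's clamped running total, plus one combining sweep (objective: alternative decomposition).


-- ===== PORT A =====
-- the loop 'for b in new_bins: …' with state (new_cdf, cum_count, prev_cdf1_count, prev_cdf2_count)
def loopA (d1 d2 : PySem.Dict Int Int) :
    List Int → PySem.Dict Int Int → Int → Int → Int → PySem.Dict Int Int
  | [], out, _, _, _ => out
  | b :: bs, out, cum, p1, p2 =>
    let cum1 := if d1.contains b then cum + max (d1.getD b 0 - p1) 0 else cum
    let q1 := if d1.contains b then d1.getD b 0 else p1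
    let cum2 := if d2.contains b then cum1 + max (d2.getD b 0 - p2) 0 else cum1
    let q2 := if d2.contains b then d2.getD b 0 else p2
    loopA d1 d2 bs (out.insert b cum2) cum2 q1 q2

def combine_cdf (cdf1 : List (Int × Int)) (cdf2 : List (Int × Int)) : List (Int × Int) :=
  let d1 := PySem.Dict.mk cdf1
  let d2 := PySem.Dict.mk cdf2
  match PySem.List.min? d1.keys (fun x => x), PySem.List.min? d2.keys (fun x => x),
        PySem.List.max? d1.keys (fun x => x), PySem.List.max? d2.keys (fun x => x) with
  | some m1, some m2, some M1, some M2 =>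
    let newMin := min m1 m2
    let newMax := max M1 M2
    let newBins := PySem.List.pyRange newMin (newMax + 1) 1
    (loopA d1 d2 newBins PySem.Dict.empty 0 0 0).items
  | _, _, _, _ => []  -- Python raises ValueError (min/max of an empty dict); excluded by Pre_

-- ===== PORT B =====
-- '_contribs': loop over the sorted keys with state (out, total, prev)
def contribLoop (d : PySem.Dict Int Int) :
    List Int → PySem.Dict Int Int → Int → Int → PySem.Dict Int Int
  | [], out, _, _ => out
  | k :: ks, out, total, prev =>
    let cur := d.getD k 0
    let t := total + max (cur - prev) 0
    contribLoop d ks (out.insert k t) t cur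

def contribs (cdf : List (Int × Int)) : PySem.Dict Int Int :=
  let d := PySem.Dict.mk cdf
  contribLoop d (PySem.List.sorted d.keys (fun x => x) false) PySem.Dict.empty 0 0

-- the combining sweep with state (new_cdf, v1, v2)
def sweep (c1 c2 : PySem.Dict Int Int) :
    List Int → PySem.Dict Int Int → Int → Int → PySem.Dict Int Int
  | [], out, _, _ => out
  | b :: bs, out, v1, v2 =>
    let w1 := if c1.contains b then c1.getD b 0 else v1
    let w2 := if c2.contains b then c2.getD b 0 else v2
    sweep c1 c2 bs (out.insert b (w1 + w2)) w1 w2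

def combine_cdf_alt (cdf1 : List (Int × Int)) (cdf2 : List (Int × Int)) : List (Int × Int) :=
  let c1 := contribs cdf1
  let c2 := contribs cdf2
  let d1 := PySem.Dict.mk cdf1
  let d2 := PySem.Dict.mk cdf2
  match PySem.List.min? d1.keys (fun x => x) with
  | none => []  -- Python raises ValueError here too; excluded by Pre_
  | some m1 =>
    match PySem.List.min? d2.keys (fun x => x) with
    | none => []
    | some m2 =>
      match PySem.List.max? d1.keys (fun x => x) with
      | none => []
      | some M1 =>
        match PySem.List.max? d2.keys (fun x => x) with
        | none => []
        | some M2 =>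
          let lo := min m1 m2
          let hi := max M1 M2
          (sweep c1 c2 (PySem.List.pyRange lo (hi + 1) 1) PySem.Dict.empty 0 0).items

-- ===== PRECONDITION & SPEC =====
-- Pre_ excludes empty dicts, on which both Pythons raise ValueError (min of an empty sequence),
-- and association lists with duplicate keys, which do not represent a Python dict input.
def Pre_combine_cdf (cdf1 : List (Int × Int)) (cdf2 : List (Int × Int)) : Prop :=
  cdf1 ≠ [] ∧ cdf2 ≠ [] ∧ (cdf1.map Prod.fst).Nodup ∧ (cdf2.map Prod.fst).Nodup

instance (cdf1 : List (Int × Int)) (cdf2 : List (Int × Int)) : Decidable (Pre_combine_cdf cdf1 cdf2) := by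
  unfold Pre_combine_cdf; infer_instance

def pvWitness_combine_cdf : (List (Int × Int)) × (List (Int × Int)) :=
  ([(0, 2), (3, 1)], [(2, 4)])

def Spec_combine_cdf (cdf1 : List (Int × Int)) (cdf2 : List (Int × Int)) (out : List (Int × Int)) : Prop := out = combine_cdf_alt cdf1 cdf2
instance (cdf1 : List (Int × Int)) (cdf2 : List (Int × Int)) (out : List (Int × Int)) : Decidable (Spec_combine_cdf cdf1 cdf2 out) := by unfold Spec_combine_cdf; infer_instance

-- ===== CLAIM (what is proved, stated in full; the proofs are below) =====
def Claim_equal_combine_cdf : Prop := ∀ (cdf1 : List (Int × Int)) (cdf2 : List (Int × Int)), Dom_combine_cdf cdf1 cdf2 → Pre_combine_cdf cdf1 cdf2 → Spec_combine_cdf cdf1 cdf2 (combine_cdf cdf1 cdf2)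

-- ===== LEMMAS AND PROOFS =====

-- Invariant of the sweep relative to A's per-source state (p, v): at every present bin b of the
-- remaining bin list, the precomputed contribution equals v + max(value - p, 0), updated on the way.
def SweepInv (d c : PySem.Dict Int Int) : List Int → Int → Int → Prop
  | [], _, _ => True
  | b :: bs, p, v =>
    (∀ x, d.get? b = some x →
        c.getD b 0 = v + max (x - p) 0 ∧ SweepInv d c bs x (v + max (x - p) 0))
    ∧ (d.get? b = none → SweepInv d c bs p v)

-- The same invariant along a list of (distinct, present) keys.
def KeyInv (d c : PySem.Dict Int Int) : List Int → Int → Int → Prop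
  | [], _, _ => True
  | k :: ks, p, v =>
    c.getD k 0 = v + max (d.getD k 0 - p) 0 ∧
      KeyInv d c ks (d.getD k 0) (v + max (d.getD k 0 - p) 0)

theorem contribLoop_contains (d : PySem.Dict Int Int) :
    ∀ (ks : List Int) (out : PySem.Dict Int Int) (t p k : Int),
      (contribLoop d ks out t p).contains k = (out.contains k || decide (k ∈ ks)) := by
  intro ks
  induction ks with
  | nil => intro out t p k; simp [contribLoop]
  | cons k' ks ih =>
    intro out t p k
    simp only [contribLoop, ih, PySem.Dict.contains_insert, List.mem_cons]
    by_cases h : k = k'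
    · subst h; simp
    · simp [h, beq_eq_false_iff_ne.mpr h]

theorem loopA_eq_sweep (d1 d2 c1 c2 : PySem.Dict Int Int)
    (hk1 : ∀ b, c1.contains b = d1.contains b) (hk2 : ∀ b, c2.contains b = d2.contains b) :
    ∀ (bs : List Int) (out : PySem.Dict Int Int) (cum p1 p2 v1 v2 : Int),
      cum = v1 + v2 → SweepInv d1 c1 bs p1 v1 → SweepInv d2 c2 bs p2 v2 →
      loopA d1 d2 bs out cum p1 p2 = sweep c1 c2 bs out v1 v2 := by
  intro bs
  induction bs with
  | nil => intro out cum p1 p2 v1 v2 _ _ _; simp [loopA, sweep]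
  | cons b bs ih =>
    intro out cum p1 p2 v1 v2 hc h1 h2
    subst hc
    obtain ⟨h1s, h1n⟩ := h1
    obtain ⟨h2s, h2n⟩ := h2
    simp only [loopA, sweep, hk1 b, hk2 b]
    cases hg1 : d1.get? b with
    | none =>
      have hc1 : d1.contains b = false := by
        rw [PySem.Dict.contains_eq_isSome_get?, hg1]; rfl
      cases hg2 : d2.get? b with
      | none =>
        have hc2 : d2.contains b = false := by
          rw [PySem.Dict.contains_eq_isSome_get?, hg2]; rfl
        simp only [hc1, hc2, Bool.false_eq_true, if_false]
        exact ih _ _ _ _ _ _ rfl (h1n hg1) (h2n hg2)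
      | some x2 =>
        have hc2 : d2.contains b = true := by
          rw [PySem.Dict.contains_eq_isSome_get?, hg2]; rfl
        have hval2 : d2.getD b 0 = x2 := by
          rw [PySem.Dict.getD_eq_get?_getD, hg2]; rfl
        obtain ⟨he2, hi2⟩ := h2s x2 hg2
        simp only [hc1, hc2, Bool.false_eq_true, if_false, if_true, hval2, he2]
        have ha : v1 + v2 + max (x2 - p2) 0 = v1 + (v2 + max (x2 - p2) 0) := by omega
        rw [ha]
        exact ih _ _ _ _ _ _ rfl (h1n hg1) hi2
    | some x1 =>
      have hc1 : d1.contains b = true := by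
        rw [PySem.Dict.contains_eq_isSome_get?, hg1]; rfl
      have hval1 : d1.getD b 0 = x1 := by
        rw [PySem.Dict.getD_eq_get?_getD, hg1]; rfl
      obtain ⟨he1, hi1⟩ := h1s x1 hg1
      cases hg2 : d2.get? b with
      | none =>
        have hc2 : d2.contains b = false := by
          rw [PySem.Dict.contains_eq_isSome_get?, hg2]; rfl
        simp only [hc1, hc2, Bool.false_eq_true, if_false, if_true, hval1, he1]
        have ha : v1 + v2 + max (x1 - p1) 0 = v1 + max (x1 - p1) 0 + v2 := by omega
        rw [ha]
        exact ih _ _ _ _ _ _ rfl hi1 (h2n hg2)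
      | some x2 =>
        have hc2 : d2.contains b = true := by
          rw [PySem.Dict.contains_eq_isSome_get?, hg2]; rfl
        have hval2 : d2.getD b 0 = x2 := by
          rw [PySem.Dict.getD_eq_get?_getD, hg2]; rfl
        obtain ⟨he2, hi2⟩ := h2s x2 hg2
        simp only [hc1, hc2, if_true, hval1, hval2, he1, he2]
        have ha : v1 + v2 + max (x1 - p1) 0 + max (x2 - p2) 0
            = v1 + max (x1 - p1) 0 + (v2 + max (x2 - p2) 0) := by omega
        rw [ha]
        exact ih _ _ _ _ _ _ rfl hi1 hi2

theorem inv_of_filter (d c : PySem.Dict Int Int) :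
    ∀ (bs : List Int) (ks : List Int) (p v : Int),
      bs.filter (fun b => d.contains b) = ks → KeyInv d c ks p v → SweepInv d c bs p v := by
  intro bs
  induction bs with
  | nil =>
    intro ks p v hf _
    exact trivial
  | cons b bs ih =>
    intro ks p v hf hk
    by_cases hb : d.contains b = true
    · rw [List.filter_cons_of_pos hb] at hf
      subst hf
      obtain ⟨hhead, htail⟩ := hk
      refine ⟨?_, ?_⟩
      · intro x hx
        have hval : d.getD b 0 = x := by
          rw [PySem.Dict.getD_eq_get?_getD, hx]; rfl
        rw [hval] at hhead htail
        exact ⟨hhead, ih _ _ _ rfl htail⟩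
      · intro hnone
        rw [PySem.Dict.contains_eq_isSome_get?, hnone] at hb
        simp at hb
    · have hb' : d.contains b = false := by
        cases h : d.contains b
        · rfl
        · exact absurd h hb
      rw [List.filter_cons_of_neg (by simp [hb'])] at hf
      refine ⟨?_, ?_⟩
      · intro x hx
        rw [PySem.Dict.contains_eq_isSome_get?, hx] at hb'
        simp at hb'
      · intro _
        exact ih _ _ _ hf hk

theorem contribLoop_getD_of_not_mem (d : PySem.Dict Int Int) :
    ∀ (ks : List Int) (out : PySem.Dict Int Int) (t p k : Int),
      k ∉ ks → (contribLoop d ks out t p).getD k 0 = out.getD k 0 := by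
  intro ks
  induction ks with
  | nil => intro out t p k _; rfl
  | cons k' ks ih =>
    intro out t p k hk
    simp only [List.mem_cons, not_or] at hk
    simp only [contribLoop]
    rw [ih _ _ _ _ hk.2]
    exact PySem.Dict.getD_insert_of_ne out _ _ hk.1

theorem good_contribLoop (d : PySem.Dict Int Int) :
    ∀ (ks : List Int) (out : PySem.Dict Int Int) (t p : Int),
      ks.Nodup → KeyInv d (contribLoop d ks out t p) ks p t := by
  intro ks
  induction ks with
  | nil => intro out t p _; exact trivial
  | cons k ks ih =>
    intro out t p hnd
    rw [List.nodup_cons] at hnd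
    simp only [contribLoop]
    refine ⟨?_, ?_⟩
    · rw [contribLoop_getD_of_not_mem d ks _ _ _ k hnd.1, PySem.Dict.getD_insert_self]
    · exact ih _ _ _ hnd.2

theorem filter_pyRange_eq_sorted (d : PySem.Dict Int Int) (lo hi : Int)
    (hnd : d.keys.Nodup) (hmem : ∀ k ∈ d.keys, lo ≤ k ∧ k ≤ hi) :
    (PySem.List.pyRange lo (hi + 1) 1).filter (fun b => d.contains b)
      = PySem.List.sorted d.keys (fun x => x) false := by
  refine (PySem.List.sorted_eq_of_perm_of_pairwise_lt _ _ _ ?_ ?_).symm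
  · -- the filtered range is a permutation of the keys
    rw [List.perm_ext_iff_of_nodup (List.Nodup.filter _ (PySem.List.nodup_pyRange_one lo (hi + 1))) hnd]
    intro a
    simp only [List.mem_filter, PySem.List.mem_pyRange_one,
      PySem.Dict.contains_eq_decide_mem_keys, decide_eq_true_eq]
    constructor
    · rintro ⟨_, h⟩; exact h
    · intro h
      obtain ⟨h1, h2⟩ := hmem a h
      exact ⟨⟨h1, by omega⟩, h⟩
  · exact List.Pairwise.filter _ (PySem.List.pairwise_lt_pyRange_one lo (hi + 1))

theorem contains_contribs_eq (cdf : List (Int × Int)) (b : Int) :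
    (contribs cdf).contains b = (PySem.Dict.mk cdf).contains b := by
  unfold contribs
  rw [contribLoop_contains]
  simp [PySem.List.mem_sorted, PySem.Dict.contains_eq_decide_mem_keys]

-- ===== VERDICT (by name: the statement is the Claim_ definition above) =====
theorem combine_cdf_spec : Claim_equal_combine_cdf := by
  intro cdf1 cdf2 _ hpre
  obtain ⟨hne1, hne2, hnd1, hnd2⟩ := hpre
  unfold Spec_combine_cdf combine_cdf combine_cdf_alt
  have hk1 : (PySem.Dict.mk cdf1).keys = cdf1.map Prod.fst := by simp [PySem.Dict.keys]
  have hk2 : (PySem.Dict.mk cdf2).keys = cdf2.map Prod.fst := by simp [PySem.Dict.keys]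
  have hknd1 : (PySem.Dict.mk cdf1).keys.Nodup := by rw [hk1]; exact hnd1
  have hknd2 : (PySem.Dict.mk cdf2).keys.Nodup := by rw [hk2]; exact hnd2
  have hkne1 : (PySem.Dict.mk cdf1).keys ≠ [] := by
    rw [hk1]; simpa using hne1
  have hkne2 : (PySem.Dict.mk cdf2).keys ≠ [] := by
    rw [hk2]; simpa using hne2
  cases hm1 : PySem.List.min? (PySem.Dict.mk cdf1).keys (fun x => x) with
  | none => exact absurd ((PySem.List.min?_eq_none_iff _ _).mp hm1) hkne1
  | some m1 =>
  cases hm2 : PySem.List.min? (PySem.Dict.mk cdf2).keys (fun x => x) with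
  | none => exact absurd ((PySem.List.min?_eq_none_iff _ _).mp hm2) hkne2
  | some m2 =>
  cases hM1 : PySem.List.max? (PySem.Dict.mk cdf1).keys (fun x => x) with
  | none => exact absurd ((PySem.List.max?_eq_none_iff _ _).mp hM1) hkne1
  | some M1 =>
  cases hM2 : PySem.List.max? (PySem.Dict.mk cdf2).keys (fun x => x) with
  | none => exact absurd ((PySem.List.max?_eq_none_iff _ _).mp hM2) hkne2
  | some M2 =>
  simp only [hm1, hm2, hM1, hM2]
  refine congrArg PySem.Dict.items
    (loopA_eq_sweep _ _ _ _ (fun b => contains_contribs_eq cdf1 b)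
      (fun b => contains_contribs_eq cdf2 b) _ _ _ _ _ _ _ (by omega) ?_ ?_)
  · apply inv_of_filter _ _ _ (PySem.List.sorted (PySem.Dict.mk cdf1).keys (fun x => x) false)
    · apply filter_pyRange_eq_sorted _ _ _ hknd1
      intro k hkmem
      constructor
      · have := PySem.List.min?_isMin hm1 k hkmem
        have h2 : min m1 m2 ≤ m1 := min_le_left _ _
        omega
      · have := PySem.List.max?_isMax hM1 k hkmem
        have h2 : M1 ≤ max M1 M2 := le_max_left _ _
        omega
    · exact good_contribLoop _ _ _ _ _ ((PySem.List.sorted_perm _ _ _).nodup_iff.mpr hknd1)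
  · apply inv_of_filter _ _ _ (PySem.List.sorted (PySem.Dict.mk cdf2).keys (fun x => x) false)
    · apply filter_pyRange_eq_sorted _ _ _ hknd2
      intro k hkmem
      constructor
      · have := PySem.List.min?_isMin hm2 k hkmem
        have h2 : min m1 m2 ≤ m2 := min_le_right _ _
        omega
      · have := PySem.List.max?_isMax hM2 k hkmem
        have h2 : M2 ≤ max M1 M2 := le_max_right _ _
        omega
    · exact good_contribLoop _ _ _ _ _ ((PySem.List.sorted_perm _ _ _).nodup_iff.mpr hknd2)
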